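-- pv_equiv track=rewrite | github.com/acymbalski/tamagotchi | tools/stream_viewer.py | _compute_ram_diff
-- ===== SOURCE A (Python) =====
-- def _compute_ram_diff(ram_a, ram_b):
--     """Compare two 320-byte RAMs, return {nibble_addr: (old_val, new_val)} for differences."""
--     diff = {}
--     for byte_idx in range(min(len(ram_a), len(ram_b))):
--         if ram_a[byte_idx] != ram_b[byte_idx]:
--             # High nibble (even address)
--             addr_hi = byte_idx * 2
--             old_hi = (ram_a[byte_idx] & 0xF0) >> 4
--             new_hi = (ram_b[byte_idx] & 0xF0) >> 4
--             if old_hi != new_hi: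
--                 diff[addr_hi] = (old_hi, new_hi)
--             # Low nibble (odd address)
--             addr_lo = byte_idx * 2 + 1
--             old_lo = ram_a[byte_idx] & 0x0F
--             new_lo = ram_b[byte_idx] & 0x0F
--             if old_lo != new_lo:
--                 diff[addr_lo] = (old_lo, new_lo)
--     return diff
-- ===== SOURCE B (Python) =====
-- def _compute_ram_diff(ram_a, ram_b):
--     """Compare two RAMs nibble-by-nibble: loop over the nibble address space,
--     extracting each nibble by address parity, instead of per-byte with nested branches."""
--     diff = {}
--     for addr in range(2 * min(len(ram_a), len(ram_b))):
--         byte_idx = addr // 2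
--         if addr % 2 == 0:
--             old = (ram_a[byte_idx] & 0xF0) >> 4
--             new = (ram_b[byte_idx] & 0xF0) >> 4
--         else:
--             old = ram_a[byte_idx] & 0x0F
--             new = ram_b[byte_idx] & 0x0F
--         if old != new:
--             diff[addr] = (old, new)
--     return diff
-- ===== Notes on version B (the rewrite author's own statement) =====
-- stated objective: alternative
-- what changed: B iterates once over the nibble address space (2*min(len)) extracting each nibble by address parity, instead of A's per-byte loop with a byte-inequality guard and two nested nibble branches.
import Mathlib
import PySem

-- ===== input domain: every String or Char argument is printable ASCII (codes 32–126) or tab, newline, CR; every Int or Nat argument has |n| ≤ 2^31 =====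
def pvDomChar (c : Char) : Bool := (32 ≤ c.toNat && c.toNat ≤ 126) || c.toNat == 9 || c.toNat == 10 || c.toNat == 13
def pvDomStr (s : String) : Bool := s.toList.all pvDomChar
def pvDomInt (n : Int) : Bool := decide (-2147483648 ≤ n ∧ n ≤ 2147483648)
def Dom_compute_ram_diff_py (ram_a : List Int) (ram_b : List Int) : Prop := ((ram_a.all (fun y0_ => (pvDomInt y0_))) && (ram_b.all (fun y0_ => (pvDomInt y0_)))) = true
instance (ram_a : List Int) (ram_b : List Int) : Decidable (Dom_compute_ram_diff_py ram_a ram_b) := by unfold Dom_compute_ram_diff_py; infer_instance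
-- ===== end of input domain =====

-- B replaces A's per-byte loop with nested nibble branches by a single loop over the
-- nibble address space, selecting each nibble by address parity (objective: alternative).

-- ===== PORT A =====
-- per-byte step of A's loop body
def pvStepA (ram_a ram_b : List Int) (diff : PySem.Dict Int (Int × Int)) (byte_idx : Int) : PySem.Dict Int (Int × Int) :=
  let a := PySem.List.pyGetD ram_a byte_idx 0
  let b := PySem.List.pyGetD ram_b byte_idx 0
  if a ≠ b then
    let diff1 :=
      let old_hi := (PySem.Int.band a 240) >>> 4
      let new_hi := (PySem.Int.band b 240) >>> 4
      if old_hi ≠ new_hi then diff.insert (byte_idx * 2) (old_hi, new_hi) else diff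
    let old_lo := PySem.Int.band a 15
    let new_lo := PySem.Int.band b 15
    if old_lo ≠ new_lo then diff1.insert (byte_idx * 2 + 1) (old_lo, new_lo) else diff1
  else diff

def compute_ram_diff_py (ram_a : List Int) (ram_b : List Int) : List (Int × Int × Int) :=
  ((PySem.List.pyRange 0 (min (PySem.List.len ram_a) (PySem.List.len ram_b)) 1).foldl
    (pvStepA ram_a ram_b) PySem.Dict.empty).items

-- ===== PORT B =====
-- per-nibble-address step of B's loop body
def pvStepB (ram_a ram_b : List Int) (diff : PySem.Dict Int (Int × Int)) (addr : Int) : PySem.Dict Int (Int × Int) :=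
  let byte_idx := PySem.Int.floordiv addr 2
  let old := if PySem.Int.mod addr 2 = 0 then (PySem.Int.band (PySem.List.pyGetD ram_a byte_idx 0) 240) >>> 4
             else PySem.Int.band (PySem.List.pyGetD ram_a byte_idx 0) 15
  let new := if PySem.Int.mod addr 2 = 0 then (PySem.Int.band (PySem.List.pyGetD ram_b byte_idx 0) 240) >>> 4
             else PySem.Int.band (PySem.List.pyGetD ram_b byte_idx 0) 15
  if old ≠ new then diff.insert addr (old, new) else diff

def compute_ram_diff_py_alt (ram_a : List Int) (ram_b : List Int) : List (Int × Int × Int) :=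
  ((PySem.List.pyRange 0 (2 * min (PySem.List.len ram_a) (PySem.List.len ram_b)) 1).foldl
    (pvStepB ram_a ram_b) PySem.Dict.empty).items

-- ===== PRECONDITION & SPEC =====
def Spec_compute_ram_diff_py (ram_a : List Int) (ram_b : List Int) (out : List (Int × Int × Int)) : Prop := out = compute_ram_diff_py_alt ram_a ram_b
instance (ram_a : List Int) (ram_b : List Int) (out : List (Int × Int × Int)) : Decidable (Spec_compute_ram_diff_py ram_a ram_b out) := by unfold Spec_compute_ram_diff_py; infer_instance

-- ===== CLAIM (what is proved, stated in full; the proofs are below) =====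
def Claim_equal_compute_ram_diff_py : Prop := ∀ (ram_a : List Int) (ram_b : List Int), Dom_compute_ram_diff_py ram_a ram_b → Spec_compute_ram_diff_py ram_a ram_b (compute_ram_diff_py ram_a ram_b)

-- ===== LEMMAS AND PROOFS =====

lemma pv_fdiv_even (a : Int) : PySem.Int.floordiv (2 * a) 2 = a := by
  rw [PySem.Int.floordiv_eq_ediv_of_pos (by omega)]; omega

lemma pv_fdiv_odd (a : Int) : PySem.Int.floordiv (2 * a + 1) 2 = a := by
  rw [PySem.Int.floordiv_eq_ediv_of_pos (by omega)]; omega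

lemma pv_mod_even (a : Int) : PySem.Int.mod (2 * a) 2 = 0 := by
  rw [PySem.Int.mod_eq_emod_of_pos (by omega)]; omega

lemma pv_mod_odd (a : Int) : PySem.Int.mod (2 * a + 1) 2 = 1 := by
  rw [PySem.Int.mod_eq_emod_of_pos (by omega)]; omega

-- two B steps (high then low nibble address) equal one A step
lemma pv_step_eq (ram_a ram_b : List Int) (a : Int) (d : PySem.Dict Int (Int × Int)) :
    pvStepB ram_a ram_b (pvStepB ram_a ram_b d (2 * a)) (2 * a + 1) = pvStepA ram_a ram_b d a := by
  simp only [pvStepB, pvStepA, pv_fdiv_even, pv_fdiv_odd, pv_mod_even, pv_mod_odd]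
  by_cases h : PySem.List.pyGetD ram_a a 0 = PySem.List.pyGetD ram_b a 0
  · simp [h]
  · simp only [if_neg (by omega : ¬ (1:Int) = 0), if_pos h]
    simp [Int.mul_comm]

lemma pv_fold_eq (ram_a ram_b : List Int) (m : Int) :
    ∀ (k : Nat) (a : Int), a + (k : Int) = m →
    ∀ d, (PySem.List.pyRange a m 1).foldl (pvStepA ram_a ram_b) d =
         (PySem.List.pyRange (2 * a) (2 * m) 1).foldl (pvStepB ram_a ram_b) d := by
  intro k
  induction k with
  | zero =>
    intro a ha d
    rw [PySem.List.pyRange_one_eq_nil (by omega), PySem.List.pyRange_one_eq_nil (by omega)]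
    rfl
  | succ k ih =>
    intro a ha d
    rw [PySem.List.pyRange_one_cons (by omega : a < m),
        PySem.List.pyRange_one_cons (by omega : 2 * a < 2 * m),
        PySem.List.pyRange_one_cons (by omega : 2 * a + 1 < 2 * m)]
    simp only [List.foldl_cons]
    rw [pv_step_eq]
    have h2 : (2 : Int) * a + 1 + 1 = 2 * (a + 1) := by ring
    rw [h2]
    exact ih (a + 1) (by omega) _

-- ===== VERDICT (by name: the statement is the Claim_ definition above) =====
theorem compute_ram_diff_py_spec : Claim_equal_compute_ram_diff_py := by
  intro ram_a ram_b _
  unfold Spec_compute_ram_diff_py compute_ram_diff_py compute_ram_diff_py_alt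
  have h := pv_fold_eq ram_a ram_b (min (PySem.List.len ram_a) (PySem.List.len ram_b))
    (min (PySem.List.len ram_a) (PySem.List.len ram_b)).toNat 0
    (by simp only [PySem.List.len]; omega) PySem.Dict.empty
  norm_num at h
  simp only [PySem.List.len]
  rw [h]
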